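-- pv_equiv track=rewrite | github.com/NEST-wk/SonoraKit | backend/main.py | format_messages_anthropic
-- ===== SOURCE A (Python) =====
-- from typing import List, Optional, Dict, Any
--
-- def format_messages_anthropic(history: List[Dict], new_message: str) -> tuple:
--     """Format messages for Anthropic Claude API"""
--     messages = []
--     system_message = ""
--
--     for msg in history:
--         if msg["role"] == "system":
--             system_message = msg["content"]
--         else:
--             messages.append({
--                 "role": msg["role"],
--                 "content": msg["content"]
--             })
--
--     messages.append({"role": "user", "content": new_message})
--     return messages, system_message
-- ===== SOURCE B (Python) =====
-- def format_messages_anthropic(history, new_message):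
--     messages = [{"role": m["role"], "content": m["content"]}
--                 for m in history if m["role"] != "system"]
--     messages.append({"role": "user", "content": new_message})
--     system_message = next((m["content"] for m in reversed(history)
--                            if m["role"] == "system"), "")
--     return messages, system_message
-- ===== Notes on version B (the rewrite author's own statement) =====
-- stated objective: idiomatic
-- what changed: Replaced the single accumulating loop by a comprehension over non-system entries plus a separate reversed next() search for the last system message (defaulting to ''), i.e. a two-pass decomposition.
import Mathlib
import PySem

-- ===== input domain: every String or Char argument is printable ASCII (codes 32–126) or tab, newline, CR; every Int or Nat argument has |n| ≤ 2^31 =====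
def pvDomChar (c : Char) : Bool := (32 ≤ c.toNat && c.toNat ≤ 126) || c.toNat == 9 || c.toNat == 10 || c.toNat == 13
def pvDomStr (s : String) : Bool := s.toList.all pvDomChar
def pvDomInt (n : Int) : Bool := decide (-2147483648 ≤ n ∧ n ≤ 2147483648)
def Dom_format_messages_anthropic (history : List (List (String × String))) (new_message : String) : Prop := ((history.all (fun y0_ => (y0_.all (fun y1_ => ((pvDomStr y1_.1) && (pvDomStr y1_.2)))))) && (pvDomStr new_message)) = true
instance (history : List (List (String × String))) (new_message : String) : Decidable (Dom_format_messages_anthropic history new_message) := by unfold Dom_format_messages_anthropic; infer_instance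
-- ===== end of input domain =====

-- B reformats the history as a comprehension over non-system entries plus a separate
-- reversed search for the last system message, instead of A's single accumulating loop.

-- msg["k"] on a dict-as-association-list: first match (KeyError = none, excluded by Pre_)
def pvLookup (m : List (String × String)) (k : String) : Option String :=
  (m.find? (fun p => p.1 == k)).map Prod.snd

-- ===== PORT A =====
def format_messages_anthropic (history : List (List (String × String))) (new_message : String) : (List (List (String × String))) × String :=
  let st := history.foldl
    (fun (st : (List (List (String × String))) × String) msg =>
      if (pvLookup msg "role").getD "" == "system" then
        (st.1, (pvLookup msg "content").getD "")
      else
        (st.1 ++ [[("role", (pvLookup msg "role").getD ""),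
                   ("content", (pvLookup msg "content").getD "")]], st.2))
    ([], "")
  (st.1 ++ [[("role", "user"), ("content", new_message)]], st.2)

-- ===== PORT B =====
def format_messages_anthropic_alt (history : List (List (String × String))) (new_message : String) : (List (List (String × String))) × String :=
  let messages :=
    (history.filter (fun m => !((pvLookup m "role").getD "" == "system"))).map
      (fun m => [("role", (pvLookup m "role").getD ""),
                 ("content", (pvLookup m "content").getD "")])
    ++ [[("role", "user"), ("content", new_message)]]
  let system_message :=
    match history.reverse.find? (fun m => (pvLookup m "role").getD "" == "system") with
    | some m => (pvLookup m "content").getD ""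
    | none => ""
  (messages, system_message)

-- ===== PRECONDITION & SPEC =====
-- Pre_: every history entry has the keys "role" and "content" (Python raises KeyError otherwise).
def Pre_format_messages_anthropic (history : List (List (String × String))) (new_message : String) : Prop :=
  ∀ m ∈ history, (pvLookup m "role").isSome ∧ (pvLookup m "content").isSome
instance (history : List (List (String × String))) (new_message : String) : Decidable (Pre_format_messages_anthropic history new_message) := by unfold Pre_format_messages_anthropic; infer_instance

def pvWitness_format_messages_anthropic : (List (List (String × String))) × String :=
  ([[("role", "system"), ("content", "be brief")], [("role", "user"), ("content", "hi")]], "hello")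

def Spec_format_messages_anthropic (history : List (List (String × String))) (new_message : String) (out : (List (List (String × String))) × String) : Prop := out = format_messages_anthropic_alt history new_message
instance (history : List (List (String × String))) (new_message : String) (out : (List (List (String × String))) × String) : Decidable (Spec_format_messages_anthropic history new_message out) := by unfold Spec_format_messages_anthropic; infer_instance

-- ===== CLAIM (what is proved, stated in full; the proofs are below) =====
def Claim_equal_format_messages_anthropic : Prop := ∀ (history : List (List (String × String))) (new_message : String), Dom_format_messages_anthropic history new_message → Pre_format_messages_anthropic history new_message → Spec_format_messages_anthropic history new_message (format_messages_anthropic history new_message)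

-- ===== LEMMAS AND PROOFS =====

-- the loop invariant of A's fold: messages component = filter-map, system component = last-wins search
lemma pv_fold_eq (history : List (List (String × String)))
    (acc : List (List (String × String))) (sys : String) :
    history.foldl
      (fun (st : (List (List (String × String))) × String) msg =>
        if (pvLookup msg "role").getD "" == "system" then
          (st.1, (pvLookup msg "content").getD "")
        else
          (st.1 ++ [[("role", (pvLookup msg "role").getD ""),
                     ("content", (pvLookup msg "content").getD "")]], st.2))
      (acc, sys)
    = (acc ++ (history.filter (fun m => !((pvLookup m "role").getD "" == "system"))).map
          (fun m => [("role", (pvLookup m "role").getD ""),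
                     ("content", (pvLookup m "content").getD "")]),
       match history.reverse.find? (fun m => (pvLookup m "role").getD "" == "system") with
       | some m => (pvLookup m "content").getD ""
       | none => sys) := by
  induction history generalizing acc sys with
  | nil => simp
  | cons msg rest ih =>
    simp only [List.foldl_cons, List.reverse_cons, List.find?_append]
    by_cases h : ((pvLookup msg "role").getD "" == "system") = true
    · simp only [h, List.filter_cons, Bool.not_true, ih]
      cases hf : rest.reverse.find? (fun m => (pvLookup m "role").getD "" == "system") <;>
        simp [hf, List.find?, h]
    · simp only [h, List.filter_cons, ih]
      cases hf : rest.reverse.find? (fun m => (pvLookup m "role").getD "" == "system") <;>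
        simp [hf, List.find?, h]

-- ===== VERDICT (by name: the statement is the Claim_ definition above) =====
theorem format_messages_anthropic_spec : Claim_equal_format_messages_anthropic := by
  intro history new_message _ _
  unfold Spec_format_messages_anthropic format_messages_anthropic format_messages_anthropic_alt
  simp only [pv_fold_eq, List.nil_append]
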